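-- pv_equiv track=rewrite | github.com/Lymah121/RewardCraft | code/backend/game/state_encoder.py | _calculate_threat
-- ===== SOURCE A (Python) =====
-- def _calculate_threat(enemies: list) -> int:
--     """
--     Calculate threat level based on enemy types.
--     0 = low (only normal/fast)
--     1 = medium (has tanky)
--     2 = high (has boss)
--     """
--     has_tanky = False
--     has_boss = False
--
--     for enemy in enemies:
--         enemy_type = enemy.get("type", "normal")
--         if enemy_type == "boss":
--             has_boss = True
--         elif enemy_type == "tanky":
--             has_tanky = True
--
--     if has_boss:
--         return 2  # High threat
--     elif has_tanky:
--         return 1  # Medium threat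
--     else:
--         return 0  # Low threat
-- ===== SOURCE B (Python) =====
-- def _calculate_threat(enemies: list) -> int:
--     """Severity-ordered short-circuit scans: return 2 at the first boss,
--     otherwise 1 if any tanky enemy exists, otherwise 0."""
--     if any(e.get("type", "normal") == "boss" for e in enemies):
--         return 2
--     if any(e.get("type", "normal") == "tanky" for e in enemies):
--         return 1
--     return 0
-- ===== Notes on version B (the rewrite author's own statement) =====
-- stated objective: idiomatic
-- what changed: Replaces A's single pass accumulating two boolean flags plus a trailing if/elif cascade with severity-ordered short-circuit any() scans: return 2 at the first boss seen, else scan again for tanky, else 0.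
import Mathlib
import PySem

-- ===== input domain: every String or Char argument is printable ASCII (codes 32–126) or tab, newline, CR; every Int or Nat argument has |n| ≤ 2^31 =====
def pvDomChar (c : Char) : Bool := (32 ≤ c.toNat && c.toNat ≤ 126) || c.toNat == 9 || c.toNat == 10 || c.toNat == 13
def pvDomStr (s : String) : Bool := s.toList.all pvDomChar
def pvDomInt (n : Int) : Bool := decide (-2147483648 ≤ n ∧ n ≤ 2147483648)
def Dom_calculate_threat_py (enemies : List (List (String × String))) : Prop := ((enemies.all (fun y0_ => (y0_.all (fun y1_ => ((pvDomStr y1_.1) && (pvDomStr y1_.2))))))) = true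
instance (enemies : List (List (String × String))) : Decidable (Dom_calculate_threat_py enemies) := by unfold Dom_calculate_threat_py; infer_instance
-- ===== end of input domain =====

-- ===== PORT A =====
-- B replaces A's flag-accumulating single pass + if/elif cascade with severity-ordered
-- short-circuit scans (idiomatic any()); same O(n) cost.
-- loop body of A: updates the (has_tanky, has_boss) flags for one enemy
def pvStepA (st : Bool × Bool) (enemy : List (String × String)) : Bool × Bool :=
  let enemy_type := (PySem.Dict.mk enemy).getD "type" "normal"
  if enemy_type == "boss" then (st.1, true)
  else if enemy_type == "tanky" then (true, st.2)
  else st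

def calculate_threat_py (enemies : List (List (String × String))) : Int :=
  let st := enemies.foldl pvStepA (false, false)
  if st.2 then 2 else if st.1 then 1 else 0

-- ===== PORT B =====
-- e.get("type", "normal")
def pvType (e : List (String × String)) : String := (PySem.Dict.mk e).getD "type" "normal"

def calculate_threat_py_alt (enemies : List (List (String × String))) : Int :=
  if enemies.any (fun e => pvType e == "boss") then 2
  else if enemies.any (fun e => pvType e == "tanky") then 1
  else 0

-- ===== PRECONDITION & SPEC =====
def Spec_calculate_threat_py (enemies : List (List (String × String))) (out : Int) : Prop := out = calculate_threat_py_alt enemies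
instance (enemies : List (List (String × String))) (out : Int) : Decidable (Spec_calculate_threat_py enemies out) := by unfold Spec_calculate_threat_py; infer_instance

-- ===== CLAIM (what is proved, stated in full; the proofs are below) =====
def Claim_equal_calculate_threat_py : Prop := ∀ (enemies : List (List (String × String))), Dom_calculate_threat_py enemies → Spec_calculate_threat_py enemies (calculate_threat_py enemies)

-- ===== LEMMAS AND PROOFS =====
-- A's fold accumulates exactly the two 'any' facts B tests
lemma pvFlags (enemies : List (List (String × String))) (t b : Bool) :
    enemies.foldl pvStepA (t, b)
      = (t || enemies.any (fun e => pvType e == "tanky"),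
         b || enemies.any (fun e => pvType e == "boss")) := by
  induction enemies generalizing t b with
  | nil => simp
  | cons e rest ih =>
    simp only [List.foldl_cons, List.any_cons]
    by_cases hB : pvType e = "boss"
    · have : pvStepA (t, b) e = (t, true) := by simp [pvStepA, pvType] at hB ⊢; simp [hB]
      rw [this, ih]
      simp only [pvType] at hB ⊢
      simp [hB]
    · by_cases hT : pvType e = "tanky"
      · have : pvStepA (t, b) e = (true, b) := by
          simp [pvStepA, pvType] at hB hT ⊢; simp [hB, hT]
        rw [this, ih]
        simp only [pvType] at hB hT ⊢
        simp [hB, hT]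
      · have : pvStepA (t, b) e = (t, b) := by
          simp [pvStepA, pvType] at hB hT ⊢; simp [hB, hT]
        rw [this, ih]
        simp only [pvType] at hB hT ⊢
        rw [beq_eq_false_iff_ne.mpr hB, beq_eq_false_iff_ne.mpr hT]
        simp

-- ===== VERDICT (by name: the statement is the Claim_ definition above) =====
theorem calculate_threat_py_spec : Claim_equal_calculate_threat_py := by
  intro enemies _
  unfold Spec_calculate_threat_py calculate_threat_py calculate_threat_py_alt
  rw [pvFlags]
  simp
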